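-- pv_equiv track=rewrite | github.com/Survivor538/4D-Miner-AutoBuilder | ver_0_30/planner.py | _compute_w_level_z_ranges
-- ===== SOURCE A (Python) =====
-- from collections import defaultdict
--
-- ColumnKey = tuple[int, int, int]      # (x, z, w)
--
-- def _compute_w_level_z_ranges(
--
--     column_map: dict[ColumnKey, list[int]]
-- ) -> dict[int, tuple[int, int]]:
--     """
--     计算：
--         w -> (min_z, max_z)
--     """
--     z_map: dict[int, list[int]] = defaultdict(list)
--
--     for (x, z, w) in column_map.keys():
--         z_map[w].append(z)
--
--     result: dict[int, tuple[int, int]] = {}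
--     for w, zs in z_map.items():
--         result[w] = (min(zs), max(zs))
--
--     return result
-- ===== SOURCE B (Python) =====
-- def _compute_w_level_z_ranges(column_map):
--     """
--     w -> (min_z, max_z), computed in a single pass keeping running extrema
--     per w instead of collecting all z-values per w and reducing afterwards.
--     """
--     result = {}
--     for (x, z, w) in column_map.keys():
--         old = result.get(w)
--         result[w] = (z, z) if old is None else (min(old[0], z), max(old[1], z))
--     return result
-- ===== Notes on version B (the rewrite author's own statement) =====
-- stated objective: simpler
-- what changed: B drops A's intermediate z_map of per-w lists and the second reduce pass: one fold over the keys maintains a running (min_z, max_z) per w directly.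
import Mathlib
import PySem

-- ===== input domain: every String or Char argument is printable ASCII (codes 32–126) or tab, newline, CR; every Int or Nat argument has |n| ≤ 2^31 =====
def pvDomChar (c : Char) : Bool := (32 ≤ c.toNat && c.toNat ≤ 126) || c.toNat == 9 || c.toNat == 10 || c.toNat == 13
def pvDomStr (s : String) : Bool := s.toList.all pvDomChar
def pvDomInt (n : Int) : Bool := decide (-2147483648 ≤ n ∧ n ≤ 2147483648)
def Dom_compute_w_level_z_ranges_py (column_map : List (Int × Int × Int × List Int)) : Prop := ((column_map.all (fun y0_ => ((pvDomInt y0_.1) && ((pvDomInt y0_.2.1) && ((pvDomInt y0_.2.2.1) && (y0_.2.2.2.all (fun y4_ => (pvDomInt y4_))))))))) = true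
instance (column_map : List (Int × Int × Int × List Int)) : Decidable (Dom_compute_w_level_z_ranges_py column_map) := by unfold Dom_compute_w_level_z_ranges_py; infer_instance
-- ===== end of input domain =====

-- B replaces A's intermediate per-w list of z-values (built, then reduced with
-- min/max) by a single fold keeping a running (min_z, max_z) per w; return values
-- are proved equal on all inputs.

-- ===== PORT A =====
-- Literal port of A: first group z by w into z_map (defaultdict(list)), then a
-- second loop reduces each list with min/max.  Every list stored in z_map is
-- nonempty, so Python's min(zs)/max(zs) never raise; the '.getD 0' default on
-- PySem.List.min?/max? is never used.
def compute_w_level_z_ranges_py (column_map : List (Int × Int × Int × List Int)) : List (Int × Int × Int) :=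
  ((column_map.foldl (fun d k => d.modify k.2.2.1 [] (fun zs => zs ++ [k.2.1]))
      PySem.Dict.empty).items.foldl
    (fun r p => r.insert p.1
      ((PySem.List.min? p.2 (fun z => z)).getD 0, (PySem.List.max? p.2 (fun z => z)).getD 0))
    PySem.Dict.empty).items.map (fun p => (p.1, p.2.1, p.2.2))

-- ===== PORT B =====
-- Port of B: one pass; for each key (x, z, w) update result[w] to the running
-- (min, max), initialising with (z, z) when w is first seen.
def compute_w_level_z_ranges_py_alt (column_map : List (Int × Int × Int × List Int)) : List (Int × Int × Int) :=
  (column_map.foldl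
    (fun r k => r.insert k.2.2.1
      (match r.get? k.2.2.1 with
       | none => (k.2.1, k.2.1)
       | some old => (min old.1 k.2.1, max old.2 k.2.1)))
    PySem.Dict.empty).items.map (fun p => (p.1, p.2.1, p.2.2))

-- ===== PRECONDITION & SPEC =====
def Spec_compute_w_level_z_ranges_py (column_map : List (Int × Int × Int × List Int)) (out : List (Int × Int × Int)) : Prop := out = compute_w_level_z_ranges_py_alt column_map
instance (column_map : List (Int × Int × Int × List Int)) (out : List (Int × Int × Int)) : Decidable (Spec_compute_w_level_z_ranges_py column_map out) := by unfold Spec_compute_w_level_z_ranges_py; infer_instance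

-- ===== CLAIM (what is proved, stated in full; the proofs are below) =====
def Claim_equal_compute_w_level_z_ranges_py : Prop := ∀ (column_map : List (Int × Int × Int × List Int)), Dom_compute_w_level_z_ranges_py column_map → Spec_compute_w_level_z_ranges_py column_map (compute_w_level_z_ranges_py column_map)

-- ===== LEMMAS AND PROOFS =====

-- B's per-step combining function (matches the match in the port of B).
def gB (o : Option (Int × Int)) (z : Int) : Int × Int :=
  match o with
  | none => (z, z)
  | some old => (min old.1 z, max old.2 z)

-- B's loop, looked up at one key w: it folds gB over exactly the z's whose key is w.
theorem getB_foldl (l : List (Int × Int × Int × List Int)) (d : PySem.Dict Int (Int × Int)) (w : Int) :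
    (l.foldl (fun r k => r.insert k.2.2.1 (gB (r.get? k.2.2.1) k.2.1)) d).get? w
      = (l.filter (fun k => k.2.2.1 == w)).foldl (fun o k => some (gB o k.2.1)) (d.get? w) := by
  induction l generalizing d with
  | nil => rfl
  | cons k l ih =>
    simp only [List.foldl_cons, List.filter_cons]
    rw [ih]
    by_cases h : k.2.2.1 = w
    · subst h
      simp [PySem.Dict.get?_insert_self]
    · rw [PySem.Dict.get?_insert_of_ne _ _ (Ne.symm h)]
      simp [h]

-- Folding gB over a list of z's starting from a known pair is the running min/max.
theorem foldl_gB (zs : List Int) (lo hi : Int) :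
    zs.foldl (fun o z => some (gB o z)) (some (lo, hi))
      = some (zs.foldl min lo, zs.foldl max hi) := by
  induction zs generalizing lo hi with
  | nil => rfl
  | cons z zs ih =>
    simp only [List.foldl_cons]
    have hg : gB (some (lo, hi)) z = (min lo z, max hi z) := rfl
    rw [hg, ih]

theorem compute_w_level_z_ranges_py_spec : Claim_equal_compute_w_level_z_ranges_py := by
  intro cm _
  unfold Spec_compute_w_level_z_ranges_py
  unfold compute_w_level_z_ranges_py compute_w_level_z_ranges_py_alt
  have hBfun : (fun (r : PySem.Dict Int (Int × Int)) (k : Int × Int × Int × List Int) =>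
      r.insert k.2.2.1
        (match r.get? k.2.2.1 with
         | none => (k.2.1, k.2.1)
         | some old => (min old.1 k.2.1, max old.2 k.2.1)))
      = (fun r k => r.insert k.2.2.1 (gB (r.get? k.2.2.1) k.2.1)) := by
    funext r k
    cases hr : r.get? k.2.2.1 <;> rfl
  rw [hBfun]
  -- abbreviations for the two intermediate dicts
  set zmap : PySem.Dict Int (List Int) :=
    cm.foldl (fun d k => d.modify k.2.2.1 [] (fun zs => zs ++ [k.2.1])) PySem.Dict.empty with hzm
  set d2 : PySem.Dict Int (Int × Int) :=
    cm.foldl (fun r k => r.insert k.2.2.1 (gB (r.get? k.2.2.1) k.2.1)) PySem.Dict.empty with hd2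
  -- both dicts have the same keys: the distinct w's in input order
  have hK1 : zmap.keys = PySem.Set.ofList (cm.map (fun k => k.2.2.1)) := by
    rw [hzm, PySem.Dict.keys_foldl_modify_key cm (fun k => k.2.2.1) []
        (fun _ k => fun zs => zs ++ [k.2.1]) PySem.Dict.empty,
      PySem.Dict.keys_empty, PySem.Set.update_nil_left]
  have hK2 : d2.keys = PySem.Set.ofList (cm.map (fun k => k.2.2.1)) := by
    rw [hd2, PySem.Dict.keys_foldl_insert_key cm (fun k => k.2.2.1)
        (fun r k => gB (r.get? k.2.2.1) k.2.1) PySem.Dict.empty,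
      PySem.Dict.keys_empty, PySem.Set.update_nil_left]
  have hnd1 : zmap.keys.Nodup := by
    rw [hK1]; exact PySem.Set.nodup_ofList _
  have hnd2 : d2.keys.Nodup := by
    rw [hK2]; exact PySem.Set.nodup_ofList _
  -- A's second loop inserts only fresh keys, so it appends
  have hfresh := PySem.Dict.items_foldl_insert_fresh zmap.items (fun p => p.1)
    (fun p => ((PySem.List.min? p.2 (fun z => z)).getD 0, (PySem.List.max? p.2 (fun z => z)).getD 0))
    PySem.Dict.empty (fun a _ => PySem.Dict.contains_empty _) hnd1
  rw [hfresh]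
  have hempty_items : (PySem.Dict.empty : PySem.Dict Int (Int × Int)).items = [] := rfl
  rw [hempty_items, List.nil_append]
  rw [PySem.Dict.items_eq_map_keys zmap hnd1 [], PySem.Dict.items_eq_map_keys d2 hnd2 (0, 0),
    hK1, hK2]
  simp only [List.map_map]
  apply List.map_congr_left
  intro w hw
  -- w occurs as a key in cm
  obtain ⟨k0, hk0, hkey⟩ := List.mem_map.mp ((PySem.Set.mem_ofList _ _).mp hw)
  -- A's list of z-values grouped at w
  have hzs : zmap.getD w [] = (cm.filter (fun k => k.2.2.1 == w)).map (fun k => k.2.1) := by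
    rw [hzm, show (cm.foldl (fun d k => d.modify k.2.2.1 [] (fun zs => zs ++ [k.2.1]))
          PySem.Dict.empty)
        = ((cm.map (fun k => (k.2.2.1, k.2.1))).foldl
            (fun d p => d.modify p.1 [] (fun zs => zs ++ [p.2])) PySem.Dict.empty)
      from (@List.foldl_map _ _ _ (fun k => (k.2.2.1, k.2.1))
          (fun d p => d.modify p.1 [] (fun zs => zs ++ [p.2])) cm PySem.Dict.empty).symm]
    rw [PySem.Dict.getD_foldl_modify_append, List.filter_map, List.map_map]
    have : (PySem.Dict.empty : PySem.Dict Int (List Int)).getD w [] = [] := rfl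
    rw [this, List.nil_append]
    rfl
  -- B's running pair at w
  have hget2 : d2.get? w
      = ((cm.filter (fun k => k.2.2.1 == w)).map (fun k => k.2.1)).foldl
          (fun o z => some (gB o z)) none := by
    rw [hd2, getB_foldl cm PySem.Dict.empty w, PySem.Dict.get?_empty, List.foldl_map]
  -- the grouped list is nonempty
  have hne : (cm.filter (fun k => k.2.2.1 == w)).map (fun k => k.2.1) ≠ [] := by
    have : k0 ∈ cm.filter (fun k => k.2.2.1 == w) :=
      List.mem_filter.mpr ⟨hk0, by simp [hkey]⟩
    intro hnil
    rw [List.map_eq_nil_iff] at hnil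
    rw [hnil] at this
    exact (List.not_mem_nil) this
  cases hcons : (cm.filter (fun k => k.2.2.1 == w)).map (fun k => k.2.1) with
  | nil => exact absurd hcons hne
  | cons z t =>
    rw [hcons] at hzs hget2
    have hgB : gB none z = (z, z) := rfl
    rw [List.foldl_cons, hgB, foldl_gB] at hget2
    simp only [Function.comp_apply]
    rw [hzs, PySem.Dict.getD_eq_get?_getD d2 w (0, 0), hget2]
    simp only [PySem.List.min?_id_cons, PySem.List.max?_id_cons, Option.getD_some]
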